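-- pv_equiv track=rewrite | github.com/skuffed/webscraper-corpus | main.py | indexQuery
-- ===== SOURCE A (Python) =====
-- def indexQuery(q, qindex):
--   mf = 0
--   tokens = q.split()
--   for word in tokens:
--     #tally term freq in qindex
--     qindex[word] = qindex.get(word, 0) + 1
--     if qindex[word] > mf:
--       mf = qindex[word]
--   #return max freq to use in tf*idf calc
--   return mf
-- ===== SOURCE B (Python) =====
-- def indexQuery(q, qindex):
--   tokens = q.split()
--   # distinct tokens in first-occurrence order; each gets its whole tally at once
--   # (brute-force per-word count instead of an incremental per-token tally)
--   words = list(dict.fromkeys(tokens))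
--   for w in words:
--     qindex[w] = qindex.get(w, 0) + tokens.count(w)
--   return max([0] + [qindex[w] for w in words])
-- ===== Notes on version B (the rewrite author's own statement) =====
-- stated objective: alternative
-- what changed: A makes one fused pass over the tokens, bumping each token's dict count by 1 and tracking a running max of the intermediate counts; B instead iterates over the DISTINCT tokens, computes each word's whole tally in one shot with tokens.count(w) (a brute-force inner scan, no incremental counting and no running max), writes it into qindex once, and takes the max of these final counts afterwards.
import Mathlib
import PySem

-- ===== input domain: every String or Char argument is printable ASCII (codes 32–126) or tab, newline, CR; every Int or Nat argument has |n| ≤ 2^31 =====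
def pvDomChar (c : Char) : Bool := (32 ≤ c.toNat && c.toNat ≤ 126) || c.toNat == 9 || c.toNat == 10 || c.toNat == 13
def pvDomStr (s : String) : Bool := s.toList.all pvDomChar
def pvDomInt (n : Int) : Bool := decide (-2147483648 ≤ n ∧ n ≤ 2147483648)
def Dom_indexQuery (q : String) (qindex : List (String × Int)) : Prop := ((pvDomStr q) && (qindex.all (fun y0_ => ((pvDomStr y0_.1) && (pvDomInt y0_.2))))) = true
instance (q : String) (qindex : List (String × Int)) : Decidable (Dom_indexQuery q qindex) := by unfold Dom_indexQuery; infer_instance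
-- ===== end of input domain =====

-- B replaces A's incremental per-token tally with a running max by a brute-force pass over the
-- DISTINCT tokens, giving each its whole count at once (tokens.count) and taking the max of the
-- final counts afterwards (objective: alternative; B leaves qindex with the same final mapping
-- as A, so only the return value is at stake).

-- ===== PORT A =====
def indexQuery (q : String) (qindex : List (String × Int)) : Int :=
  let tokens := PySem.Str.split₀ q
  let r := tokens.foldl (fun (st : PySem.Dict String Int × Int) word =>
      let d := st.1.insert word (st.1.getD word 0 + 1)
      let v := d.getD word 0
      (d, if v > st.2 then v else st.2))
    (PySem.Dict.mk qindex, 0)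
  r.2

-- ===== PORT B =====
def indexQuery_alt (q : String) (qindex : List (String × Int)) : Int :=
  let tokens := PySem.Str.split₀ q
  let words := PySem.List.dedup tokens        -- list(dict.fromkeys(tokens))
  let d := words.foldl (fun (d : PySem.Dict String Int) w =>
      d.insert w (d.getD w 0 + (tokens.count w : Int))) (PySem.Dict.mk qindex)
  -- max([0] + [qindex[w] for w in words]): the list is nonempty, so Python's max returns
  match PySem.List.max? ((0 : Int) :: words.map (fun w => d.getD w 0)) (fun y => y) with
  | some v => v
  | none => 0

-- ===== PRECONDITION & SPEC =====
def Spec_indexQuery (q : String) (qindex : List (String × Int)) (out : Int) : Prop := out = indexQuery_alt q qindex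
instance (q : String) (qindex : List (String × Int)) (out : Int) : Decidable (Spec_indexQuery q qindex out) := by unfold Spec_indexQuery; infer_instance

-- ===== CLAIM (what is proved, stated in full; the proofs are below) =====
def Claim_equal_indexQuery : Prop := ∀ (q : String) (qindex : List (String × Int)), Dom_indexQuery q qindex → Spec_indexQuery q qindex (indexQuery q qindex)

-- ===== LEMMAS AND PROOFS =====

-- running max of a projection, an upper-bound introduction rule (the matching elimination
-- rules are PySem.List.le_foldl_max_int)
theorem foldlMax_le {α : Type} (f : α → Int) (L : List α) (b c : Int)
    (hb : b ≤ c) (hf : ∀ x ∈ L, f x ≤ c) :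
    L.foldl (fun m w => max m (f w)) b ≤ c := by
  induction L generalizing b with
  | nil => simpa using hb
  | cons w rest ih =>
    simp only [List.foldl_cons]
    exact ih _ (by have := hf w (by simp); omega) (fun x hx => hf x (by simp [hx]))

-- the running max depends only on which elements occur
theorem foldlMax_congr_mem {α : Type} (f : α → Int) (L M : List α) (b : Int)
    (h : ∀ x, x ∈ L ↔ x ∈ M) :
    L.foldl (fun m w => max m (f w)) b = M.foldl (fun m w => max m (f w)) b := by
  obtain ⟨hbL, hL⟩ := PySem.List.le_foldl_max_int L f b
  obtain ⟨hbM, hM⟩ := PySem.List.le_foldl_max_int M f b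
  exact le_antisymm
    (foldlMax_le f L b _ hbM (fun x hx => hM x ((h x).mp hx)))
    (foldlMax_le f M b _ hbL (fun x hx => hL x ((h x).mpr hx)))

-- raising the base by a value that occurs among the folded elements does not change the max
theorem foldlMax_absorb {α : Type} (f : α → Int) (L : List α) (b : Int) {w : α}
    (hw : w ∈ L) :
    L.foldl (fun m w => max m (f w)) (max b (f w)) = L.foldl (fun m w => max m (f w)) b := by
  obtain ⟨hb, hL⟩ := PySem.List.le_foldl_max_int L f b
  refine le_antisymm (foldlMax_le f L _ _ ?_ (fun x hx => hL x hx)) ?_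
  · exact max_le hb (hL w hw)
  · obtain ⟨hb', hL'⟩ := PySem.List.le_foldl_max_int L f (max b (f w))
    exact foldlMax_le f L b _ (le_trans (le_max_left _ _) hb') (fun x hx => hL' x hx)

-- A's loop = (the incremental counting dict, running max of the FINAL counts over the tokens):
-- final counts only grow, so comparing against the final count at each step gives the same max
theorem loopA_eq (ts : List String) (d : PySem.Dict String Int) (m : Int) :
    ts.foldl (fun (st : PySem.Dict String Int × Int) word =>
      let d := st.1.insert word (st.1.getD word 0 + 1)
      let v := d.getD word 0
      (d, if v > st.2 then v else st.2)) (d, m)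
    = (ts.foldl (fun d w => d.insert w (d.getD w 0 + 1)) d,
       ts.foldl (fun acc w =>
         max acc ((ts.foldl (fun d w => d.insert w (d.getD w 0 + 1)) d).getD w 0)) m) := by
  induction ts generalizing d m with
  | nil => rfl
  | cons w rest ih =>
    simp only [List.foldl_cons]
    rw [ih]
    refine Prod.ext rfl ?_
    simp only
    have hself : ((d.insert w (d.getD w 0 + 1)).getD w 0) = d.getD w 0 + 1 :=
      PySem.Dict.getD_insert_self _ _ _ _
    rw [hself]
    have hcount : ((rest.foldl (fun d w => d.insert w (d.getD w 0 + 1)) (d.insert w (d.getD w 0 + 1))).getD w 0)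
        = (d.insert w (d.getD w 0 + 1)).getD w 0 + rest.count w :=
      PySem.Dict.getD_foldl_insert_add_one rest _ w
    rw [hself] at hcount
    have hmax : (if d.getD w 0 + 1 > m then d.getD w 0 + 1 else m) = max m (d.getD w 0 + 1) := by
      rw [max_def]; split_ifs <;> omega
    rw [hmax]
    by_cases hw : w ∈ rest
    · have h1 : max m ((rest.foldl (fun d w => d.insert w (d.getD w 0 + 1)) (d.insert w (d.getD w 0 + 1))).getD w 0)
          = max (max m (d.getD w 0 + 1))
              ((fun x => (rest.foldl (fun d w => d.insert w (d.getD w 0 + 1)) (d.insert w (d.getD w 0 + 1))).getD x 0) w) := by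
        simp only; omega
      rw [h1, foldlMax_absorb (fun x => (rest.foldl (fun d w => d.insert w (d.getD w 0 + 1)) (d.insert w (d.getD w 0 + 1))).getD x 0) rest (max m (d.getD w 0 + 1)) hw]
    · have h0 : rest.count w = 0 := List.count_eq_zero_of_not_mem hw
      rw [h0] at hcount
      rw [hcount]
      norm_num

-- a fold of inserts never touching key w leaves d.getD w unchanged
theorem foldl_insert_getD_not_mem (L : List String) (v : PySem.Dict String Int → String → Int)
    (init : PySem.Dict String Int) (w : String) (hw : w ∉ L) :
    (L.foldl (fun d x => d.insert x (v d x)) init).getD w 0 = init.getD w 0 := by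
  induction L generalizing init with
  | nil => rfl
  | cons x rest ih =>
    simp only [List.foldl_cons]
    rw [ih _ (fun h => hw (by simp [h]))]
    exact PySem.Dict.getD_insert_of_ne _ _ _ (fun h => hw (by simp [h]))

-- B's loop over the distinct tokens: each member ends with its initial value plus its full count
theorem loopB_getD (ts : List String) (L : List String) (init : PySem.Dict String Int)
    (hnd : L.Nodup) (w : String) (hw : w ∈ L) :
    (L.foldl (fun d x => d.insert x (d.getD x 0 + (ts.count x : Int))) init).getD w 0
      = init.getD w 0 + ts.count w := by
  induction L generalizing init with
  | nil => cases hw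
  | cons x rest ih =>
    simp only [List.foldl_cons]
    rcases List.mem_cons.mp hw with h | h
    · subst h
      rw [foldl_insert_getD_not_mem _ _ _ _ (List.nodup_cons.mp hnd).1]
      exact PySem.Dict.getD_insert_self _ _ _ _
    · have hxw : x ≠ w := by rintro rfl; exact (List.nodup_cons.mp hnd).1 h
      rw [ih _ (List.nodup_cons.mp hnd).2 h]
      rw [PySem.Dict.getD_insert_of_ne _ _ _ (Ne.symm hxw)]

-- ===== VERDICT (by name: the statement is the Claim_ definition above) =====
theorem indexQuery_spec : Claim_equal_indexQuery := by
  intro q qindex _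
  unfold Spec_indexQuery indexQuery indexQuery_alt
  simp only
  rw [loopA_eq]
  rw [PySem.List.max?_id_cons]
  simp only [List.foldl_map]
  set ts := PySem.Str.split₀ q with hts
  -- rewrite B's values to the shared closed form, then compare memberships
  have hB : ∀ x ∈ PySem.List.dedup ts,
      ((PySem.List.dedup ts).foldl (fun d w => d.insert w (d.getD w 0 + (ts.count w : Int)))
        (PySem.Dict.mk qindex)).getD x 0
      = (PySem.Dict.mk qindex).getD x 0 + ts.count x := fun x hx =>
    loopB_getD ts _ _ (PySem.List.nodup_dedup ts) x hx
  have hA : ∀ x ∈ ts,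
      ((ts.foldl (fun d w => d.insert w (d.getD w 0 + 1)) (PySem.Dict.mk qindex)).getD x 0)
      = (PySem.Dict.mk qindex).getD x 0 + ts.count x := fun x _ =>
    PySem.Dict.getD_foldl_insert_add_one ts _ x
  calc ts.foldl (fun acc w =>
        max acc ((ts.foldl (fun d w => d.insert w (d.getD w 0 + 1)) (PySem.Dict.mk qindex)).getD w 0)) 0
      = ts.foldl (fun acc w =>
        max acc ((PySem.Dict.mk qindex).getD w 0 + (ts.count w : Int))) 0 :=
        PySem.List.foldl_congr_mem' ts _ _ 0 (fun x hx acc => by rw [hA x hx])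
    _ = (PySem.List.dedup ts).foldl (fun acc w =>
        max acc ((PySem.Dict.mk qindex).getD w 0 + (ts.count w : Int))) 0 :=
        foldlMax_congr_mem _ ts (PySem.List.dedup ts) 0 (fun x => (PySem.List.mem_dedup ts x).symm)
    _ = (PySem.List.dedup ts).foldl (fun acc w =>
        max acc (((PySem.List.dedup ts).foldl (fun d w => d.insert w (d.getD w 0 + (ts.count w : Int)))
          (PySem.Dict.mk qindex)).getD w 0)) 0 :=
        (PySem.List.foldl_congr_mem' (PySem.List.dedup ts) _ _ 0 (fun x hx acc => by rw [hB x hx])).symm
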